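-- pv_equiv track=rewrite | github.com/Duckapple/Kat | helpers/config.py | commandConvert
-- ===== SOURCE A (Python) =====
-- def commandConvert(array: list):
--     result = []
--     cumulator = None
--     for item in array:
--         if item[0] == '"' or item[0] == "'":
--             cumulator = item
--         elif cumulator:
--             cumulator += " " + item
--             if cumulator[-1] == cumulator[0]:
--                 result.append(cumulator)
--                 cumulator = None
--         else:
--             result.append(item)
--     return result
-- ===== SOURCE B (Python) =====
-- def commandConvert(array: list):
--     result = []
--     n = len(array)
--     i = 0
--     while i < n:
--         tok = array[i]
--         if tok[0] == '"' or tok[0] == "'":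
--             q = tok[0]
--             cum = tok
--             j = i + 1
--             closed = False
--             while j < n:
--                 nxt = array[j]
--                 if nxt[0] == '"' or nxt[0] == "'":
--                     break
--                 cum += " " + nxt
--                 if cum[-1] == q:
--                     result.append(cum)
--                     closed = True
--                     break
--                 j += 1
--             if closed:
--                 i = j + 1
--             elif j < n:
--                 i = j          # restart at the quote token that interrupted
--             else:
--                 i = n          # open cumulator at end of input is dropped
--         else:
--             result.append(tok)
--             i += 1
--     return result
-- ===== Notes on version B (the rewrite author's own statement) =====
-- stated objective: alternative
-- what changed: Replaces A's single pass with a flat Option cumulator state by an index-based outer while loop with a nested inner loop that consumes all tokens of one quoted group at once (restarting the outer loop on an interrupting quote token, dropping an unclosed group at the end).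
import Mathlib
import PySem

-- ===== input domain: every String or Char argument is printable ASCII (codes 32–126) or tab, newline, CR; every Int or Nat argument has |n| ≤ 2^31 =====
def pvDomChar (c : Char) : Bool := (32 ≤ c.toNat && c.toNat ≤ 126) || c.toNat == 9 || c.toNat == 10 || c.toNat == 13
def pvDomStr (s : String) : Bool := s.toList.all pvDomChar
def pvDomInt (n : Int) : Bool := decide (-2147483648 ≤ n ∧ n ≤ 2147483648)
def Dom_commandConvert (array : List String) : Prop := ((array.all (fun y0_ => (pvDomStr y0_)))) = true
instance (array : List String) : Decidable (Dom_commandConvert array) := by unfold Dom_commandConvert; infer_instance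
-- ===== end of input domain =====

-- B replaces A's single pass with a flat Option-cumulator by an index/suffix-driven outer loop with a
-- nested inner loop that consumes the tokens of one quoted group (objective: alternative decomposition).

-- ===== PORT A =====
-- one iteration of A's for-loop: state = (result, cumulator)
def pvStepA (st : List String × Option (List Char)) (item : String) : List String × Option (List Char) :=
  if PySem.List.pyGet? item.toList 0 = some '"' ∨ PySem.List.pyGet? item.toList 0 = some '\'' then
    (st.1, some item.toList)
  else
    match st.2 with
    | some c =>
      if c = [] then (st.1 ++ [item], some c)   -- 'elif cumulator:' falsy on the empty string (unreachable in A)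
      else
        let c' := c ++ ' ' :: item.toList
        if PySem.List.pyGet? c' (-1) = PySem.List.pyGet? c' 0 then (st.1 ++ [String.ofList c'], none)
        else (st.1, some c')
    | none => (st.1 ++ [item], none)

def commandConvert (array : List String) : List String :=
  (array.foldl pvStepA ([], none)).1

-- ===== PORT B =====
def pvIsQuote (tok : String) : Bool :=
  PySem.List.pyGet? tok.toList 0 == some '"' || PySem.List.pyGet? tok.toList 0 == some '\''

-- B's inner while loop: consume tokens into cum; returns (closed cumulator if any, remaining suffix)
def pvInnerB (q : Option Char) (cum : List Char) : List String → Option (List Char) × List String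
  | [] => (none, [])
  | nxt :: rest =>
    if pvIsQuote nxt then (none, nxt :: rest)
    else
      let cum' := cum ++ ' ' :: nxt.toList
      if PySem.List.pyGet? cum' (-1) = q then (some cum', rest)
      else pvInnerB q cum' rest

-- needed by pvOuterB's termination
theorem pvInnerB_len (q : Option Char) : ∀ (l : List String) (cum : List Char),
    ((pvInnerB q cum l).2).length ≤ l.length := by
  intro l
  induction l with
  | nil => intro cum; simp [pvInnerB]
  | cons nxt rest ih =>
    intro cum
    by_cases h : pvIsQuote nxt
    · simp [pvInnerB, h]
    · simp only [pvInnerB, h, if_false, Bool.false_eq_true]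
      split
      · simp
      · exact le_trans (ih _) (by simp)

-- B's outer while loop over the remaining suffix of the array
def pvOuterB : List String → List String
  | [] => []
  | tok :: rest =>
    if pvIsQuote tok then
      match h : pvInnerB (PySem.List.pyGet? tok.toList 0) tok.toList rest with
      | (some cum, rest') => String.ofList cum :: pvOuterB rest'
      | (none, rest') => pvOuterB rest'
    else tok :: pvOuterB rest
  termination_by l => l.length
  decreasing_by
  · have := pvInnerB_len (PySem.List.pyGet? tok.toList 0) rest tok.toList
    rw [h] at this; simpa using Nat.lt_succ_of_le this
  · have := pvInnerB_len (PySem.List.pyGet? tok.toList 0) rest tok.toList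
    rw [h] at this; simpa using Nat.lt_succ_of_le this
  · simp

def commandConvert_alt (array : List String) : List String := pvOuterB array

-- ===== PRECONDITION & SPEC =====
-- Pre_ excludes arrays containing an empty-string token: Python A raises IndexError on item[0] there (so does B).
def Pre_commandConvert (array : List String) : Prop := ∀ t ∈ array, t ≠ ""
instance (array : List String) : Decidable (Pre_commandConvert array) := by unfold Pre_commandConvert; infer_instance
def pvWitness_commandConvert : List String := ["echo", "'a", "b'", "c"]

def Spec_commandConvert (array : List String) (out : List String) : Prop := out = commandConvert_alt array
instance (array : List String) (out : List String) : Decidable (Spec_commandConvert array out) := by unfold Spec_commandConvert; infer_instance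

-- ===== CLAIM (what is proved, stated in full; the proofs are below) =====
def Claim_equal_commandConvert : Prop := ∀ (array : List String), Dom_commandConvert array → Pre_commandConvert array → Spec_commandConvert array (commandConvert array)

-- ===== LEMMAS AND PROOFS =====

def pvMatch : Option (List Char) × List String → List String
  | (some cum, rest') => String.ofList cum :: pvOuterB rest'
  | (none, rest') => pvOuterB rest'

theorem pvFirst_append {c : List Char} (hc : c ≠ []) (d : List Char) :
    PySem.List.pyGet? (c ++ d) 0 = PySem.List.pyGet? c 0 := by
  cases c with
  | nil => exact absurd rfl hc
  | cons a t => simp [PySem.List.pyGet?_zero_cons]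

theorem pvQuote_ne_nil {tok : String}
    (h : PySem.List.pyGet? tok.toList 0 = some '"' ∨ PySem.List.pyGet? tok.toList 0 = some '\'') :
    tok.toList ≠ [] := by
  rcases h with h | h <;> · intro hn; rw [hn] at h; simp [PySem.List.pyGet?] at h

theorem pvIsQuote_iff (tok : String) :
    pvIsQuote tok = true ↔
      (PySem.List.pyGet? tok.toList 0 = some '"' ∨ PySem.List.pyGet? tok.toList 0 = some '\'') := by
  simp [pvIsQuote]

theorem pvMain : ∀ (n : Nat) (l : List String), l.length ≤ n →
    (∀ res, (List.foldl pvStepA (res, none) l).1 = res ++ pvOuterB l) ∧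
    (∀ res (c : List Char), c ≠ [] →
      (List.foldl pvStepA (res, some c) l).1
        = res ++ pvMatch (pvInnerB (PySem.List.pyGet? c 0) c l)) := by
  intro n
  induction n with
  | zero =>
    intro l hl
    have : l = [] := List.eq_nil_of_length_eq_zero (Nat.le_zero.mp hl)
    subst this
    exact ⟨fun res => by simp [pvOuterB], fun res c hc => by simp [pvInnerB, pvMatch, pvOuterB]⟩
  | succ n ih =>
    intro l hl
    cases l with
    | nil =>
      exact ⟨fun res => by simp [pvOuterB], fun res c hc => by simp [pvInnerB, pvMatch, pvOuterB]⟩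
    | cons item rest =>
      have hr : rest.length ≤ n := by simpa using Nat.lt_succ_iff.mp (Nat.lt_of_lt_of_le (by simp) hl)
      constructor
      · intro res
        by_cases hq : PySem.List.pyGet? item.toList 0 = some '"' ∨ PySem.List.pyGet? item.toList 0 = some '\''
        · have hb : pvIsQuote item = true := (pvIsQuote_iff item).mpr hq
          rw [List.foldl_cons]
          simp only [pvStepA, hq, if_pos]
          rw [(ih rest hr).2 res item.toList (pvQuote_ne_nil hq)]
          rw [pvOuterB]
          simp only [hb, if_pos]
          rcases h : pvInnerB (PySem.List.pyGet? item.toList 0) item.toList rest with ⟨o, rest'⟩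
          cases o <;> simp [pvMatch]
        · have hb : pvIsQuote item = false := by
            rw [← Bool.not_eq_true]; rw [pvIsQuote_iff]; exact hq
          rw [List.foldl_cons]
          simp only [pvStepA, hq, if_false]
          rw [(ih rest hr).1 (res ++ [item])]
          rw [pvOuterB]
          simp [hb]
      · intro res c hc
        by_cases hq : PySem.List.pyGet? item.toList 0 = some '"' ∨ PySem.List.pyGet? item.toList 0 = some '\''
        · have hb : pvIsQuote item = true := (pvIsQuote_iff item).mpr hq
          rw [List.foldl_cons]
          simp only [pvStepA, hq, if_pos]
          rw [(ih rest hr).2 res item.toList (pvQuote_ne_nil hq)]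
          rw [pvInnerB]
          simp only [hb, if_pos]
          rw [pvMatch, pvOuterB]
          simp only [hb, if_pos]
          rcases h : pvInnerB (PySem.List.pyGet? item.toList 0) item.toList rest with ⟨o, rest'⟩
          cases o <;> simp [pvMatch]
        · have hb : pvIsQuote item = false := by
            rw [← Bool.not_eq_true]; rw [pvIsQuote_iff]; exact hq
          have hc' : c ++ ' ' :: item.toList ≠ [] := by simp
          have hfst : PySem.List.pyGet? (c ++ ' ' :: item.toList) 0 = PySem.List.pyGet? c 0 :=
            pvFirst_append hc _
          rw [List.foldl_cons]
          simp only [pvStepA, hq, if_false, hc]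
          rw [pvInnerB]
          simp only [hb, if_false, Bool.false_eq_true]
          by_cases hclose :
              PySem.List.pyGet? (c ++ ' ' :: item.toList) (-1)
                = PySem.List.pyGet? (c ++ ' ' :: item.toList) 0
          · simp only [hclose, if_pos, hfst]
            rw [(ih rest hr).1 (res ++ [String.ofList (c ++ ' ' :: item.toList)])]
            simp [pvMatch]
          · simp only [hclose, if_false]
            rw [if_neg (by rw [← hfst]; exact hclose)]
            rw [(ih rest hr).2 res (c ++ ' ' :: item.toList) hc']
            rw [hfst]

-- ===== VERDICT (by name: the statement is the Claim_ definition above) =====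
theorem commandConvert_spec : Claim_equal_commandConvert := by
  intro array _ _
  unfold Spec_commandConvert commandConvert commandConvert_alt
  simpa using (pvMain array.length array le_rfl).1 []
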